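-- pv_equiv track=rewrite | github.com/marksale/NMTemplater | Templater.py | getFixedRandomall
-- ===== SOURCE A (Python) =====
-- def removeComments(Code):
--
--     lines = Code.splitlines()
--     newCode = ""
--     for thisline in lines:
--         if thisline.find(";") > -1:
--             thisline = thisline[:thisline.find(";")]
--         newCode = newCode + thisline + '\n'
--     return newCode
--
-- def getFixedRandomall(Code,key):
--         ## need to remove comments in case they have $THETA in them,
--     ## then find first $OMEG/SIGMA, then next $*, until no more $THETA, buy by lines
--
--     cleanCode = removeComments(Code)
--
--     lines = cleanCode.splitlines()
--     Code = Code.splitlines()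
--     randomBlock = []
--     nLines = len(lines)
--     nkeys = 0
--     for thisline in lines:
--         if thisline.find(key) > -1:
--             nkeys = nkeys + 1
--
--
--     # get the block from NONMEM control/temlate
--     # e.g., $THETA, even if $THETA is in several sections
--     start = 0
--     thisline = 0
--     while thisline  < nLines:
--         if lines[thisline].find(key) > -1:
--             randomBlock.append(Code[thisline])
--             thisline = thisline + 1
--
--             while thisline < nLines and lines[thisline].find("$") == -1:
--                 randomBlock.append(Code[thisline])
--                 thisline = thisline + 1
--         thisline = thisline + 1
--     return randomBlock
-- ===== SOURCE B (Python) =====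
-- def getFixedRandomall(Code, key):
--     # single linear pass with a 'collecting' state flag; no separate comment-stripping pass
--     out = []
--     collecting = False
--     for line in Code.splitlines():
--         p = line.find(";")
--         c = line[:p] if p > -1 else line
--         if collecting:
--             if "$" in c:
--                 collecting = False
--             else:
--                 out.append(line)
--         elif key in c:
--             out.append(line)
--             collecting = True
--     return out
-- ===== Notes on version B (the rewrite author's own statement) =====
-- stated objective: simpler
-- what changed: Replaced A's separate comment-stripping pass (which rebuilds the whole text and re-splits it), dead key-counting loop, and nested index-based while loops by one linear state-machine pass over the lines with a boolean 'collecting' flag, stripping each line's comment on the fly.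
import Mathlib
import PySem

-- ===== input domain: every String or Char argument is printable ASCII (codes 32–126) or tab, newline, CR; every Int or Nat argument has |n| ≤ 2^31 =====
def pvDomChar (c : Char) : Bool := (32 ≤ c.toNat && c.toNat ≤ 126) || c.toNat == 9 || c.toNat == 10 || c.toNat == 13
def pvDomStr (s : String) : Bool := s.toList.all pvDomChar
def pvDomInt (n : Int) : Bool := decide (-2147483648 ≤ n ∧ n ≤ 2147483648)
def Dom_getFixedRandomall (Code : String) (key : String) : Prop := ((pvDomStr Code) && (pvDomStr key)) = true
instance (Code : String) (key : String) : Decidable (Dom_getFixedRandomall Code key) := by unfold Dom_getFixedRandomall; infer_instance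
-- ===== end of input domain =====

-- B is a single linear state-machine pass over the lines (simpler: no separate
-- comment-stripping pass, no dead key-counting loop, no nested index loops).

-- ===== PORT A =====
def removeComments (Code : String) : String :=
  let lines := PySem.Str.splitlines Code
  lines.foldl (fun newCode thisline =>
    let thisline := if PySem.Str.find thisline ";" > -1
      then PySem.Str.slice thisline none (some (PySem.Str.find thisline ";"))
      else thisline
    String.ofList (newCode.toList ++ thisline.toList ++ ['\n'])) ""

-- the inner 'while thisline < nLines and lines[thisline].find("$") == -1' loop of A
-- (fuel makes the while loop structural; nLines fuel always suffices, proved in pvInnerEq)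
def pvInnerA (key : String) (lines CodeL : List String) (nLines : Nat) :
    Nat → Nat → List String → Nat × List String
  | 0, thisline, randomBlock => (thisline, randomBlock)
  | fuel + 1, thisline, randomBlock =>
    if thisline < nLines ∧ PySem.Str.find (lines.getD thisline "") "$" = -1 then
      pvInnerA key lines CodeL nLines fuel (thisline + 1) (randomBlock ++ [CodeL.getD thisline ""])
    else (thisline, randomBlock)

-- the outer 'while thisline < nLines' loop of A (fuel = nLines suffices: the index strictly grows)
def pvOuterA (key : String) (lines CodeL : List String) (nLines : Nat) :
    Nat → Nat → List String → List String
  | 0, _, randomBlock => randomBlock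
  | fuel + 1, thisline, randomBlock =>
    if thisline < nLines then
      if PySem.Str.find (lines.getD thisline "") key > -1 then
        let r := pvInnerA key lines CodeL nLines nLines (thisline + 1)
          (randomBlock ++ [CodeL.getD thisline ""])
        pvOuterA key lines CodeL nLines fuel (r.1 + 1) r.2
      else pvOuterA key lines CodeL nLines fuel (thisline + 1) randomBlock
    else randomBlock

def getFixedRandomall (Code : String) (key : String) : List String :=
  let cleanCode := removeComments Code
  let lines := PySem.Str.splitlines cleanCode
  let CodeL := PySem.Str.splitlines Code
  let nLines := lines.length
  -- dead 'nkeys' counting loop of A, transliterated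
  let _nkeys := lines.foldl (fun nkeys thisline =>
    if PySem.Str.find thisline key > -1 then nkeys + 1 else nkeys) (0 : Nat)
  pvOuterA key lines CodeL nLines nLines 0 []

-- ===== PORT B =====
def pvStepB (key : String) (st : Bool × List String) (line : String) : Bool × List String :=
  let p := PySem.Str.find line ";"
  let c := if p > -1 then PySem.Str.slice line none (some p) else line
  match st with
  | (true, out) => if PySem.Str.isIn "$" c then (false, out) else (true, out ++ [line])
  | (false, out) => if PySem.Str.isIn key c then (true, out ++ [line]) else (false, out)

def getFixedRandomall_alt (Code : String) (key : String) : List String :=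
  ((PySem.Str.splitlines Code).foldl (pvStepB key) (false, [])).2

-- ===== PRECONDITION & SPEC =====
def Spec_getFixedRandomall (Code : String) (key : String) (out : List String) : Prop := out = getFixedRandomall_alt Code key
instance (Code : String) (key : String) (out : List String) : Decidable (Spec_getFixedRandomall Code key out) := by unfold Spec_getFixedRandomall; infer_instance

-- ===== CLAIM (what is proved, stated in full; the proofs are below) =====
def Claim_equal_getFixedRandomall : Prop := ∀ (Code : String) (key : String), Dom_getFixedRandomall Code key → Spec_getFixedRandomall Code key (getFixedRandomall Code key)

-- ===== LEMMAS AND PROOFS =====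

-- the line-break predicate PySem.Chars.splitlines uses
def pvIsB : Char → Bool := fun c =>
  have n := c.toNat
  decide (n = 10) || decide (n = 13) || decide (n = 11) || decide (n = 12) || decide (n = 28) ||
    decide (n = 29) || decide (n = 30) || decide (n = 133) || decide (n = 8232) || decide (n = 8233)

theorem pvSplitlinesEq (s : List Char) :
    PySem.Chars.splitlines s = PySem.Chars.splitlines.go pvIsB s [] [] := rfl

-- the comment-stripping both programs apply to a line
def pvClean (line : String) : String :=
  if PySem.Str.find line ";" > -1
  then PySem.Str.slice line none (some (PySem.Str.find line ";")) else line

-- step of splitlines.go on a non-break character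
theorem pvGoStep (isB : Char → Bool) (c : Char) (t cur : List Char) (acc : List (List Char))
    (h : isB c = false) (hr : isB '\x0d' = true) :
    PySem.Chars.splitlines.go isB (c :: t) cur acc = PySem.Chars.splitlines.go isB t (c :: cur) acc := by
  rw [PySem.Chars.splitlines.go]
  · simp [h]
  · intro rest hc _
    rw [hc] at h; rw [h] at hr; exact Bool.noConfusion hr

-- step on a break character, except the '\r\n' pair
theorem pvGoBreak (isB : Char → Bool) (c : Char) (t cur : List Char) (acc : List (List Char))
    (hb : isB c = true) (hside : ∀ rest, c = '\x0d' → t = '\n' :: rest → False) :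
    PySem.Chars.splitlines.go isB (c :: t) cur acc = PySem.Chars.splitlines.go isB t [] (cur.reverse :: acc) := by
  rw [PySem.Chars.splitlines.go]
  · simp [hb]
  · exact hside

theorem pvGoCRLF (isB : Char → Bool) (t cur : List Char) (acc : List (List Char)) :
    PySem.Chars.splitlines.go isB ('\x0d' :: '\n' :: t) cur acc =
      PySem.Chars.splitlines.go isB t [] (cur.reverse :: acc) := by
  rw [PySem.Chars.splitlines.go]

theorem pvGoNil (isB : Char → Bool) (cur : List Char) (acc : List (List Char)) :
    PySem.Chars.splitlines.go isB [] cur acc =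
      if cur.isEmpty then acc.reverse else (cur.reverse :: acc).reverse := by
  rw [PySem.Chars.splitlines.go]

-- consuming one break-free line followed by '\n'
theorem pvGoLine (isB : Char → Bool) (l rest cur : List Char) (acc : List (List Char))
    (hl : ∀ c ∈ l, isB c = false) (hn : isB '\n' = true) (hr : isB '\x0d' = true) :
    PySem.Chars.splitlines.go isB (l ++ '\n' :: rest) cur acc =
      PySem.Chars.splitlines.go isB rest [] ((cur.reverse ++ l) :: acc) := by
  induction l generalizing cur with
  | nil =>
    have := pvGoBreak isB '\n' rest cur acc hn (by intro _ h _; exact absurd h (by decide))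
    simpa using this
  | cons c l' ih =>
    rw [List.cons_append, pvGoStep isB c _ cur acc (hl c (by simp)) hr,
      ih (c :: cur) (fun d hd => hl d (List.mem_cons_of_mem c hd))]
    simp

-- splitlines of break-free lines each terminated by '\n' returns exactly those lines
theorem pvGoLines (isB : Char → Bool) (ls : List (List Char)) (acc : List (List Char))
    (hls : ∀ l ∈ ls, ∀ c ∈ l, isB c = false) (hn : isB '\n' = true) (hr : isB '\x0d' = true) :
    PySem.Chars.splitlines.go isB ((ls.map (· ++ ['\n'])).flatten) [] acc = acc.reverse ++ ls := by
  induction ls generalizing acc with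
  | nil => simp [pvGoNil]
  | cons l ls' ih =>
    rw [List.map_cons, List.flatten_cons, List.append_assoc, List.singleton_append,
      pvGoLine isB l _ [] acc (hls l (by simp)) hn hr,
      ih _ (fun l' h c hc => hls l' (List.mem_cons_of_mem l h) c hc)]
    simp

-- every line splitlines.go produces is break-free
theorem pvGoNonbreak (isB : Char → Bool) (n : Nat) (s cur : List Char) (acc : List (List Char))
    (hs : s.length ≤ n) (hr : isB '\x0d' = true)
    (hc : ∀ c ∈ cur, isB c = false) (ha : ∀ l ∈ acc, ∀ c ∈ l, isB c = false) :
    ∀ l ∈ PySem.Chars.splitlines.go isB s cur acc, ∀ c ∈ l, isB c = false := by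
  induction n generalizing s cur acc with
  | zero =>
    have : s = [] := by cases s <;> simp_all
    subst this
    rw [pvGoNil]
    split
    · simpa using ha
    · intro l hl
      simp only [List.mem_reverse, List.mem_cons] at hl
      rcases hl with h | h
      · subst h; intro c hcmem; exact hc c (List.mem_reverse.mp hcmem)
      · exact ha l h
  | succ n ih =>
    cases s with
    | nil =>
      rw [pvGoNil]
      split
      · simpa using ha
      · intro l hl
        simp only [List.mem_reverse, List.mem_cons] at hl
        rcases hl with h | h
        · subst h; intro c hcmem; exact hc c (List.mem_reverse.mp hcmem)
        · exact ha l h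
    | cons c t =>
      have hacc' : ∀ l ∈ cur.reverse :: acc, ∀ c ∈ l, isB c = false := by
        intro l hl
        rcases List.mem_cons.mp hl with h | h
        · subst h; intro d hd; exact hc d (List.mem_reverse.mp hd)
        · exact ha l h
      by_cases hb : isB c = true
      · by_cases hcr : c = '\x0d'
        · subst hcr
          cases t with
          | nil =>
            rw [pvGoBreak isB _ _ cur acc hb (by intro rest _ h; exact absurd h (by simp))]
            exact ih [] [] _ (by simp) (by simp) hacc'
          | cons d t' =>
            by_cases hd : d = '\n'
            · subst hd
              rw [pvGoCRLF]
              exact ih t' [] _ (by simp at hs ⊢; omega) (by simp) hacc'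
            · rw [pvGoBreak isB _ _ cur acc hb
                (by intro rest _ h; exact hd (List.cons.inj h).1)]
              exact ih (d :: t') [] _ (by simpa using hs) (by simp) hacc'
        · rw [pvGoBreak isB _ _ cur acc hb (by intro rest h _; exact hcr h)]
          exact ih t [] _ (by simpa using hs) (by simp) hacc'
      · rw [pvGoStep isB c t cur acc (by simpa using hb) hr]
        refine ih t (c :: cur) acc (by simpa using hs) ?_ ha
        intro d hd
        rcases List.mem_cons.mp hd with h | h
        · subst h; simpa using hb
        · exact hc d h

theorem pvSplitlinesNonbreak (s : List Char) :
    ∀ l ∈ PySem.Chars.splitlines s, ∀ c ∈ l, pvIsB c = false := by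
  rw [pvSplitlinesEq]
  exact pvGoNonbreak pvIsB s.length s [] [] le_rfl rfl (by simp) (by simp)

-- a cleaned line only contains characters of the original line
theorem pvCleanSubset (s : String) : ∀ c ∈ (pvClean s).toList, c ∈ s.toList := by
  unfold pvClean
  split
  · intro c hcm
    simp only [PySem.Str.toList_slice, PySem.Chars.slice_eq_listSlice] at hcm
    exact PySem.List.mem_of_mem_slice _ _ _ hcm
  · intro c hcm; exact hcm

-- removeComments builds the concatenation of the cleaned lines, '\n'-terminated
theorem pvFoldClean (ls : List String) (init : String) :
    (ls.foldl (fun newCode thisline =>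
        String.ofList (newCode.toList ++ (pvClean thisline).toList ++ ['\n'])) init).toList =
      init.toList ++ (ls.map (fun l => (pvClean l).toList ++ ['\n'])).flatten := by
  induction ls generalizing init with
  | nil => simp
  | cons l ls' ih =>
    rw [List.foldl_cons, ih]
    simp

theorem pvRemoveCommentsToList (Code : String) :
    (removeComments Code).toList =
      ((PySem.Chars.splitlines Code.toList).map
        (fun l => (pvClean (String.ofList l)).toList ++ ['\n'])).flatten := by
  unfold removeComments
  have : (fun (newCode thisline : String) =>
      String.ofList (newCode.toList ++
        (if PySem.Str.find thisline ";" > -1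
         then PySem.Str.slice thisline none (some (PySem.Str.find thisline ";"))
         else thisline).toList ++ ['\n'])) =
      (fun newCode thisline =>
        String.ofList (newCode.toList ++ (pvClean thisline).toList ++ ['\n'])) := by
    funext a b; rw [pvClean]
  simp only []
  rw [this, pvFoldClean]
  simp only [PySem.Str.splitlines, List.map_map]
  exact congrArg List.flatten (List.map_congr_left fun l _ => rfl)

-- the cleaned lines line up: splitlines ∘ removeComments = map pvClean ∘ splitlines
theorem pvSplitClean (Code : String) :
    PySem.Str.splitlines (removeComments Code) = (PySem.Str.splitlines Code).map pvClean := by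
  have hnb := pvSplitlinesNonbreak Code.toList
  have h1 : PySem.Chars.splitlines (removeComments Code).toList =
      (PySem.Chars.splitlines Code.toList).map (fun l => (pvClean (String.ofList l)).toList) := by
    rw [pvRemoveCommentsToList, pvSplitlinesEq]
    have hmm : ((PySem.Chars.splitlines Code.toList).map
        (fun l => (pvClean (String.ofList l)).toList ++ ['\n'])) =
        (((PySem.Chars.splitlines Code.toList).map
          (fun l => (pvClean (String.ofList l)).toList)).map (· ++ ['\n'])) := by
      rw [List.map_map]
      exact List.map_congr_left fun l _ => rfl
    rw [hmm, pvGoLines pvIsB _ [] ?_ rfl rfl]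
    · simp
    · intro l hl c hcm
      rcases List.mem_map.mp hl with ⟨l0, hl0, rfl⟩
      exact hnb l0 hl0 c (by simpa using pvCleanSubset (String.ofList l0) c hcm)
  show (PySem.Chars.splitlines (removeComments Code).toList).map String.ofList = _
  rw [h1]
  simp only [PySem.Str.splitlines, List.map_map]
  refine List.map_congr_left ?_
  intro l _
  simp

-- find/isIn bridges ---------------------------------------------------------

theorem pvIsInFalse (sub s : String) :
    PySem.Str.isIn sub s = false ↔ PySem.Str.find s sub = -1 := by
  have h1 : PySem.Str.isIn sub s = PySem.Chars.isIn sub.toList s.toList := by simp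
  have h2 : PySem.Str.find s sub = PySem.Chars.find s.toList sub.toList := by simp
  rw [h1, h2, PySem.Chars.isIn_eq_false_iff, PySem.Chars.find_eq_neg_one_iff]

theorem pvIsInTrue (sub s : String) :
    PySem.Str.isIn sub s = true ↔ PySem.Str.find s sub > -1 := by
  have hle := PySem.Chars.neg_one_le_find s.toList sub.toList
  have h1 : PySem.Str.isIn sub s = PySem.Chars.isIn sub.toList s.toList := by simp
  have h2 : PySem.Str.find s sub = PySem.Chars.find s.toList sub.toList := by simp
  rw [h1, h2, PySem.Chars.isIn_iff_infix, ← PySem.Chars.find_ne_neg_one_iff]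
  omega

-- loop lemmas ---------------------------------------------------------------

theorem pvGetDMap (CodeL : List String) (i : Nat) (hi : i < CodeL.length) :
    (CodeL.map pvClean).getD i "" = pvClean (CodeL.getD i "") := by
  rw [List.getD_eq_getElem _ _ (by simpa using hi), List.getD_eq_getElem _ _ hi]
  simp

theorem pvStepBClean (key : String) (b : Bool) (out : List String) (line : String) :
    pvStepB key (b, out) line =
      if b then (if PySem.Str.isIn "$" (pvClean line) then (false, out) else (true, out ++ [line]))
      else (if PySem.Str.isIn key (pvClean line) then (true, out ++ [line]) else (false, out)) := by
  cases b <;> simp [pvStepB, pvClean]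

theorem pvInnerA_fst_ge (key : String) (lines CodeL : List String) (n fuel i : Nat)
    (acc : List String) : i ≤ (pvInnerA key lines CodeL n fuel i acc).1 := by
  induction fuel generalizing i acc with
  | zero => simp [pvInnerA]
  | succ fuel ih =>
    rw [pvInnerA]
    split
    · exact le_trans (by omega) (ih (i + 1) _)
    · simp

theorem pvInnerEq (key : String) (CodeL : List String) (fuel i : Nat) (acc : List String)
    (hf : CodeL.length ≤ fuel + i) :
    (((CodeL.drop ((pvInnerA key (CodeL.map pvClean) CodeL CodeL.length fuel i acc).1 + 1)).foldl
        (pvStepB key) (false, (pvInnerA key (CodeL.map pvClean) CodeL CodeL.length fuel i acc).2)).2 : List String) =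
      ((CodeL.drop i).foldl (pvStepB key) (true, acc)).2 := by
  induction fuel generalizing i acc with
  | zero =>
    rw [pvInnerA, List.drop_eq_nil_of_le (by omega), List.drop_eq_nil_of_le (by omega)]
    rfl
  | succ fuel ih =>
    rw [pvInnerA]
    by_cases h : i < CodeL.length ∧ PySem.Str.find ((CodeL.map pvClean).getD i "") "$" = -1
    · rw [if_pos h]
      have hi : i < CodeL.length := h.1
      rw [List.drop_eq_getElem_cons hi (l := CodeL)]
      conv_rhs => rw [List.foldl_cons, ← List.getD_eq_getElem CodeL "" hi, pvStepBClean]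
      have hno : PySem.Str.isIn "$" (pvClean (CodeL.getD i "")) = false := by
        rw [pvIsInFalse, ← pvGetDMap CodeL i hi]
        exact h.2
      rw [if_pos rfl, hno, if_neg (by simp)]
      exact ih (i + 1) _ (by omega)
    · rw [if_neg h]
      by_cases hi : i < CodeL.length
      · have hfind : PySem.Str.find ((CodeL.map pvClean).getD i "") "$" ≠ -1 := fun hff => h ⟨hi, hff⟩
        rw [List.drop_eq_getElem_cons hi (l := CodeL)]
        conv_rhs => rw [List.foldl_cons, ← List.getD_eq_getElem CodeL "" hi, pvStepBClean]
        have hyes : PySem.Str.isIn "$" (pvClean (CodeL.getD i "")) = true := by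
          rw [← pvGetDMap CodeL i hi]
          cases hb : PySem.Str.isIn "$" ((CodeL.map pvClean).getD i "")
          · exact absurd ((pvIsInFalse _ _).mp hb) hfind
          · rfl
        rw [if_pos rfl, hyes, if_pos rfl]
      · rw [List.drop_eq_nil_of_le (by omega), List.drop_eq_nil_of_le (by omega)]
        rfl

theorem pvOuterEq (key : String) (CodeL : List String) (fuel i : Nat) (acc : List String)
    (hf : CodeL.length ≤ fuel + i) :
    pvOuterA key (CodeL.map pvClean) CodeL CodeL.length fuel i acc =
      ((CodeL.drop i).foldl (pvStepB key) (false, acc)).2 := by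
  induction fuel generalizing i acc with
  | zero =>
    rw [pvOuterA, List.drop_eq_nil_of_le (by omega)]
    rfl
  | succ fuel ih =>
    rw [pvOuterA]
    by_cases hi : i < CodeL.length
    · rw [if_pos (by simpa using hi)]
      rw [List.drop_eq_getElem_cons hi (l := CodeL)]
      conv_rhs => rw [List.foldl_cons, ← List.getD_eq_getElem CodeL "" hi, pvStepBClean]
      by_cases hkey : PySem.Str.find ((CodeL.map pvClean).getD i "") key > -1
      · rw [if_pos hkey]
        have hyes : PySem.Str.isIn key (pvClean (CodeL.getD i "")) = true := by
          rw [pvIsInTrue, ← pvGetDMap CodeL i hi]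
          exact hkey
        rw [if_neg (by simp), hyes, if_pos rfl]
        have hge := pvInnerA_fst_ge key (CodeL.map pvClean) CodeL CodeL.length CodeL.length
          (i + 1) (acc ++ [CodeL.getD i ""])
        rw [ih _ _ (by omega)]
        exact pvInnerEq key CodeL CodeL.length (i + 1) (acc ++ [CodeL.getD i ""]) (by omega)
      · rw [if_neg hkey]
        have hno : PySem.Str.isIn key (pvClean (CodeL.getD i "")) = false := by
          cases hb : PySem.Str.isIn key (pvClean (CodeL.getD i ""))
          · rfl
          · exact absurd ((pvIsInTrue _ _).mp (by rwa [← pvGetDMap CodeL i hi] at hb)) hkey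
        rw [if_neg (by simp), hno, if_neg (by simp)]
        exact ih (i + 1) acc (by omega)
    · rw [if_neg (by simpa using hi), List.drop_eq_nil_of_le (by omega)]
      rfl

-- ===== VERDICT (by name: the statement is the Claim_ definition above) =====
theorem getFixedRandomall_spec : Claim_equal_getFixedRandomall := by
  intro Code key _
  unfold Spec_getFixedRandomall getFixedRandomall getFixedRandomall_alt
  dsimp only
  rw [pvSplitClean, List.length_map]
  simpa using pvOuterEq key (PySem.Str.splitlines Code) (PySem.Str.splitlines Code).length 0 []
    (by omega)
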